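-- pv_equiv track=rewrite | github.com/SungOh98/Algorithm | Binary Search/BOJ. 1654 히오스 프로게이머/16564.py | parametric_search
-- ===== SOURCE A (Python) =====
-- def is_possible(x, arr, m):
--     for i in arr:
--         # 해당 캐릭터의 레벨이 임의의 X보다 작다면
--         if i < x:
--             m -= (x - i)
--
--     return m >= 0
--
-- def parametric_search(arr, m):
--     start, end = 1, 2_000_000_000
--
--     while start <= end:
--         mid = (start + end) // 2
--
--         if is_possible(mid, arr, m):
--             start = mid + 1
--
--         else:
--             end = mid - 1
--
--     return (start + end) // 2
-- ===== SOURCE B (Python) =====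
-- def parametric_search(arr, m):
--     CAP = 2_000_000_000
--     a = sorted(arr)
--     base = sum(1 - x for x in a if x < 1)
--     if m < base:
--         return 0
--     if not a:
--         return CAP
--     k, s = 0, 0
--     while k < len(a) and k * a[k] - s <= m:
--         s += a[k]
--         k += 1
--     return min((m + s) // k, CAP)
-- ===== Notes on version B (the rewrite author's own statement) =====
-- stated objective: faster
-- what changed: Replaces the binary search over [1, 2e9] (each probe a full feasibility pass over arr) by sort + a single prefix walk that finds how many lowest characters the budget covers, then computes the final level by one closed-form floor division, capped at 2e9.
import Mathlib
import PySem

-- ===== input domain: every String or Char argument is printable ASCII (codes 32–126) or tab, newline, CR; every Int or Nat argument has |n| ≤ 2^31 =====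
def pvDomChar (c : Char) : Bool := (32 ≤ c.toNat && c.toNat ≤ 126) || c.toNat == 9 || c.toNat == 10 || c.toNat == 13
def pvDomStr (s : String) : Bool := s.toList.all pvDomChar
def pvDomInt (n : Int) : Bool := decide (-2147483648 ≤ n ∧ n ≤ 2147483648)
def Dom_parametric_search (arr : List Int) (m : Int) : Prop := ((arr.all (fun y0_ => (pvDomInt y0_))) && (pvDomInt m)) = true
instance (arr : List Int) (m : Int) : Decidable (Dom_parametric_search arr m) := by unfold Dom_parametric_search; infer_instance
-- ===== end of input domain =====

-- B replaces A's 31-iteration binary search (each a full pass over arr) by sort + prefix walk + one closed-form floor division.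

-- ===== PORT A =====
def is_possible (x : Int) (arr : List Int) (m : Int) : Bool :=
  decide (0 ≤ arr.foldl (fun acc i => if i < x then acc - (x - i) else acc) m)

-- the while loop; the Nat argument is pure fuel (the loop shrinks e - s by ≥ 1 each
-- iteration, so 2000000000 ≥ initial interval length never runs out)
def psLoop (arr : List Int) (m : Int) : Nat → Int → Int → Int
  | 0, s, e => PySem.Int.floordiv (s + e) 2
  | Nat.succ fuel, s, e =>
    if s ≤ e then
      let mid := PySem.Int.floordiv (s + e) 2
      if is_possible mid arr m then psLoop arr m fuel (mid + 1) e
      else psLoop arr m fuel s (mid - 1)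
    else
      PySem.Int.floordiv (s + e) 2

def parametric_search (arr : List Int) (m : Int) : Int :=
  psLoop arr m 2000000000 1 2000000000

-- ===== PORT B =====
def bLoop (m : Int) : List Int → Int → Int → Int × Int
  | [], k, s => (k, s)
  | x :: rest, k, s => if k * x - s ≤ m then bLoop m rest (k + 1) (s + x) else (k, s)

def parametric_search_alt (arr : List Int) (m : Int) : Int :=
  let CAP : Int := 2000000000
  let a := PySem.List.sorted arr (fun x => x) false
  let base := a.foldl (fun acc x => if x < 1 then acc + (1 - x) else acc) 0
  if m < base then 0
  else if a = [] then CAP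
  else
    let p := bLoop m a 0 0
    min (PySem.Int.floordiv (m + p.2) p.1) CAP

-- ===== PRECONDITION & SPEC =====
def Spec_parametric_search (arr : List Int) (m : Int) (out : Int) : Prop := out = parametric_search_alt arr m
instance (arr : List Int) (m : Int) (out : Int) : Decidable (Spec_parametric_search arr m out) := by unfold Spec_parametric_search; infer_instance

-- ===== CLAIM (what is proved, stated in full; the proofs are below) =====
def Claim_equal_parametric_search : Prop := ∀ (arr : List Int) (m : Int), Dom_parametric_search arr m → Spec_parametric_search arr m (parametric_search arr m)

-- ===== LEMMAS AND PROOFS =====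

-- total experience needed to bring every character of xs up to level x
def cost (xs : List Int) (x : Int) : Int := (xs.map (fun i => max 0 (x - i))).sum

-- the value A's binary search converges to, characterised without the search
def IsRes (arr : List Int) (m r : Int) : Prop :=
  (r = 0 ∧ ¬ cost arr 1 ≤ m) ∨
  (1 ≤ r ∧ r ≤ 2000000000 ∧ cost arr r ≤ m ∧ (r = 2000000000 ∨ ¬ cost arr (r + 1) ≤ m))

lemma cost_nil (x : Int) : cost [] x = 0 := rfl

lemma cost_cons (i : Int) (t : List Int) (x : Int) :
    cost (i :: t) x = max 0 (x - i) + cost t x := by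
  simp [cost]

lemma cost_nonneg (xs : List Int) (x : Int) : 0 ≤ cost xs x := by
  induction xs with
  | nil => simp [cost_nil]
  | cons i t ih => rw [cost_cons]; omega

lemma cost_mono (xs : List Int) {x y : Int} (h : x ≤ y) : cost xs x ≤ cost xs y := by
  induction xs with
  | nil => simp [cost_nil]
  | cons i t ih => rw [cost_cons, cost_cons]; omega

lemma cost_perm {xs ys : List Int} (h : xs.Perm ys) (x : Int) : cost xs x = cost ys x := by
  exact List.Perm.sum_eq (h.map _)

lemma cost_append (u v : List Int) (x : Int) : cost (u ++ v) x = cost u x + cost v x := by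
  simp [cost]

lemma cost_eq_zero_of_le (v : List Int) (x : Int) (h : ∀ z ∈ v, x ≤ z) : cost v x = 0 := by
  induction v with
  | nil => simp [cost_nil]
  | cons i t ih =>
    rw [cost_cons, ih (fun z hz => h z (List.mem_cons_of_mem _ hz))]
    have := h i List.mem_cons_self
    omega

lemma cost_eq_of_ge (u : List Int) (x : Int) (h : ∀ z ∈ u, z ≤ x) :
    cost u x = (u.length : Int) * x - u.sum := by
  induction u with
  | nil => simp [cost_nil]
  | cons i t ih =>
    rw [cost_cons, ih (fun z hz => h z (List.mem_cons_of_mem _ hz))]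
    have := h i List.mem_cons_self
    simp only [List.length_cons, List.sum_cons]
    push_cast
    have : max 0 (x - i) = x - i := by omega
    rw [this]; ring

lemma cost_ge_linear (u : List Int) (x : Int) :
    (u.length : Int) * x - u.sum ≤ cost u x := by
  induction u with
  | nil => simp [cost_nil]
  | cons i t ih =>
    rw [cost_cons]
    simp only [List.length_cons, List.sum_cons]
    push_cast
    have : x - i ≤ max 0 (x - i) := by omega
    nlinarith [ih]

lemma isRes_uniq {arr : List Int} {m r r' : Int} (h1 : IsRes arr m r) (h2 : IsRes arr m r') :
    r = r' := by
  rcases h1 with ⟨rfl, hn⟩ | ⟨ha1, ha2, ha3, ha4⟩ <;>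
    rcases h2 with ⟨rfl, hn'⟩ | ⟨hb1, hb2, hb3, hb4⟩
  · rfl
  · exact absurd (le_trans (cost_mono arr hb1) hb3) hn
  · exact absurd (le_trans (cost_mono arr ha1) ha3) hn'
  · by_contra hne
    rcases lt_or_gt_of_ne hne with h | h
    · rcases ha4 with h0 | h0
      · omega
      · exact h0 (le_trans (cost_mono arr (by omega : r + 1 ≤ r')) hb3)
    · rcases hb4 with h0 | h0
      · omega
      · exact h0 (le_trans (cost_mono arr (by omega : r' + 1 ≤ r)) ha3)

lemma is_possible_iff (x : Int) (arr : List Int) (m : Int) :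
    is_possible x arr m = true ↔ cost arr x ≤ m := by
  have key : ∀ (xs : List Int) (acc : Int),
      xs.foldl (fun acc i => if i < x then acc - (x - i) else acc) acc = acc - cost xs x := by
    intro xs
    induction xs with
    | nil => intro acc; simp [cost_nil]
    | cons i t ih =>
      intro acc
      rw [cost_cons]
      simp only [List.foldl_cons]
      by_cases hi : i < x
      · rw [if_pos hi, ih]
        have : max 0 (x - i) = x - i := by omega
        omega
      · rw [if_neg hi, ih]
        have : max 0 (x - i) = 0 := by omega
        omega
  simp [is_possible, key arr m]

lemma isRes_exit (arr : List Int) (m e : Int) (he0 : 0 ≤ e) (he : e ≤ 2000000000)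
    (h5 : e = 2000000000 ∨ ¬ cost arr (e + 1) ≤ m)
    (h4 : e = 0 ∨ cost arr e ≤ m) : IsRes arr m e := by
  by_cases he1 : 1 ≤ e
  · right
    refine ⟨he1, he, ?_, h5⟩
    rcases h4 with h | h
    · omega
    · exact h
  · have he0' : e = 0 := by omega
    subst he0'
    left
    refine ⟨rfl, ?_⟩
    rcases h5 with h | h
    · omega
    · simpa using h

lemma floordiv_self_add (e : Int) : PySem.Int.floordiv (e + 1 + e) 2 = e := by
  rw [PySem.Int.floordiv_eq_iff_of_pos (by omega)]
  omega

lemma psLoop_isRes (arr : List Int) (m : Int) :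
    ∀ (n : Nat) (s e : Int), (e + 1 - s).toNat ≤ n → 1 ≤ s → s ≤ e + 1 → e ≤ 2000000000 →
    (s = 1 ∨ cost arr (s - 1) ≤ m) → (e = 2000000000 ∨ ¬ cost arr (e + 1) ≤ m) →
    IsRes arr m (psLoop arr m n s e) := by
  intro n
  induction n with
  | zero =>
    intro s e hn h1 h2 h3 h4 h5
    have hs : s = e + 1 := by omega
    rw [psLoop, hs, floordiv_self_add]
    apply isRes_exit arr m e (by omega) h3 h5
    rcases h4 with h | h
    · left; omega
    · right; rw [hs] at h; simpa using h
  | succ n ih =>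
    intro s e hn h1 h2 h3 h4 h5
    by_cases hse : s ≤ e
    · rw [psLoop, if_pos hse]
      have hmid := PySem.Int.floordiv_two_mid_bounds hse
      set mid := PySem.Int.floordiv (s + e) 2 with hm
      simp only
      by_cases hp : is_possible mid arr m
      · rw [if_pos hp]
        apply ih (mid + 1) e (by omega) (by omega) (by omega) h3 _ h5
        right
        have := (is_possible_iff mid arr m).mp hp
        simpa using this
      · rw [if_neg hp]
        apply ih s (mid - 1) (by omega) h1 (by omega) (by omega) h4 _
        right
        rw [is_possible_iff] at hp
        simpa using hp
    · have hs : s = e + 1 := by omega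
      rw [psLoop, if_neg hse, hs, floordiv_self_add]
      apply isRes_exit arr m e (by omega) h3 h5
      rcases h4 with h | h
      · left; omega
      · right; rw [hs] at h; simpa using h

-- invariant carried by bLoop: the last taken element y satisfies k*y - s ≤ m
def okT (m : Int) (t : List Int) : Prop :=
  ∀ y ∈ t.getLast?, (t.length : Int) * y - t.sum ≤ m

def okR (m : Int) (t v : List Int) : Prop :=
  ∀ z ∈ v.head?, ¬ (t.length : Int) * z - t.sum ≤ m

lemma bLoop_go (m : Int) :
    ∀ (r t : List Int), okT m t →
    ∃ u v, r = u ++ v ∧ bLoop m r (t.length : Int) t.sum = (((t ++ u).length : Int), (t ++ u).sum)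
      ∧ okT m (t ++ u) ∧ okR m (t ++ u) v := by
  intro r
  induction r with
  | nil =>
    intro t h
    exact ⟨[], [], by simp, by simp [bLoop], by simpa using h, by simp [okR]⟩
  | cons x rest ih =>
    intro t h
    by_cases hc : (t.length : Int) * x - t.sum ≤ m
    · have hok : okT m (t ++ [x]) := by
        intro y hy
        simp [List.getLast?_append] at hy
        subst hy
        simp only [List.length_append, List.sum_append, List.length_cons, List.sum_cons,
          List.length_nil, List.sum_nil]
        push_cast
        nlinarith [hc]
      obtain ⟨u, v, hr, hb, h1, h2⟩ := ih (t ++ [x]) hok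
      refine ⟨x :: u, v, by simp [hr], ?_, by rw [List.append_assoc] at h1; exact h1,
        by rw [List.append_assoc] at h2; exact h2⟩
      rw [bLoop, if_pos hc]
      have e1 : (t.length : Int) + 1 = ((t ++ [x]).length : Int) := by simp
      have e2 : t.sum + x = (t ++ [x]).sum := by simp
      rw [e1, e2, hb]
      simp [List.append_assoc]
    · refine ⟨[], x :: rest, by simp, ?_, by simpa using h, ?_⟩
      · rw [bLoop, if_neg hc]; simp
      · intro z hz
        simp at hz
        subst hz
        simpa using hc

lemma base_fold (a : List Int) :
    a.foldl (fun acc x => if x < 1 then acc + (1 - x) else acc) 0 = cost a 1 := by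
  have key : ∀ (xs : List Int) (acc : Int),
      xs.foldl (fun acc x => if x < 1 then acc + (1 - x) else acc) acc = acc + cost xs 1 := by
    intro xs
    induction xs with
    | nil => intro acc; simp [cost_nil]
    | cons i t ih =>
      intro acc
      rw [cost_cons]
      simp only [List.foldl_cons]
      by_cases hi : i < 1
      · rw [if_pos hi, ih]
        have : max 0 (1 - i) = 1 - i := by omega
        omega
      · rw [if_neg hi, ih]
        have : max 0 (1 - i) = 0 := by omega
        omega
  simpa using key a 0

lemma mem_le_getLast {l : List Int} (hp : l.Pairwise (· ≤ ·)) {y : Int}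
    (hy : y ∈ l.getLast?) : ∀ x ∈ l, x ≤ y := by
  induction l with
  | nil => simp at hy
  | cons z t ih =>
    intro x hx
    rcases List.mem_cons.mp hx with rfl | hx
    · cases t with
      | nil => simp at hy; omega
      | cons w t' =>
        have hy' : y ∈ (w :: t').getLast? := by
          simpa [List.getLast?_cons_cons] using hy
        have hyz : y ∈ (w :: t') := List.mem_of_getLast? hy'
        exact (List.pairwise_cons.mp hp).1 y hyz
    · cases t with
      | nil => simp at hx
      | cons w t' =>
        have hy' : y ∈ (w :: t').getLast? := by
          simpa [List.getLast?_cons_cons] using hy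
        exact ih (List.pairwise_cons.mp hp).2 hy' x hx

lemma alt_isRes (arr : List Int) (m : Int) : IsRes arr m (parametric_search_alt arr m) := by
  unfold parametric_search_alt
  simp only
  set a := PySem.List.sorted arr (fun x => x) false with ha
  have hperm : a.Perm arr := PySem.List.sorted_perm arr (fun x => x) false
  have hcost : ∀ x, cost a x = cost arr x := fun x => cost_perm hperm x
  have hpair : a.Pairwise (· ≤ ·) := by
    have := PySem.List.sorted_pairwise arr (fun x => x)
    simpa using this
  rw [base_fold a]
  by_cases hgate : m < cost a 1
  · rw [if_pos hgate]
    left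
    exact ⟨rfl, by rw [← hcost]; omega⟩
  · rw [if_neg hgate]
    have hm1 : cost a 1 ≤ m := by omega
    have hm0 : 0 ≤ m := le_trans (cost_nonneg a 1) hm1
    by_cases hnil : a = []
    · rw [if_pos hnil]
      right
      refine ⟨by omega, le_refl _, ?_, Or.inl rfl⟩
      rw [← hcost 2000000000, hnil, cost_nil] at *
      omega
    · rw [if_neg hnil]
      -- run the loop from the empty prefix
      have h0 : okT m ([] : List Int) := by intro y hy; simp at hy
      obtain ⟨u, v, hsplit, hb, hT, hR⟩ := bLoop_go m a [] h0
      simp only [List.nil_append] at hsplit hb hT hR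
      have hb' : bLoop m a 0 0 = ((u.length : Int), u.sum) := by simpa using hb
      rw [hb']
      simp only
      -- u is nonempty
      have hu : u ≠ [] := by
        intro h
        subst h
        simp only [List.nil_append] at hsplit
        obtain ⟨z, t, hzt⟩ := List.exists_cons_of_ne_nil hnil
        have hv : v = z :: t := by rw [← hsplit, hzt]
        have := hR z (by rw [hv]; simp)
        simp at this
        omega
      obtain ⟨y, hy⟩ := List.getLast?_isSome.mpr hu |> Option.isSome_iff_exists.mp
      have hky : (u.length : Int) * y - u.sum ≤ m := hT y hy
      set k : Int := (u.length : Int) with hk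
      set s : Int := u.sum with hs
      have hkpos : 0 < k := by
        rw [hk]
        have : 0 < u.length := List.length_pos_iff.mpr hu
        exact_mod_cast this
      set L : Int := PySem.Int.floordiv (m + s) k with hL
      -- y ≤ L
      have hyL : y ≤ L := by
        rw [hL, PySem.Int.le_floordiv_iff_mul_le hkpos]
        nlinarith [hky]
      -- k * L ≤ m + s
      have hLk : L * k ≤ m + s := (PySem.Int.le_floordiv_iff_mul_le hkpos).mp (le_refl L)
      -- m + s < k * (L + 1)
      have hLk2 : m + s < (L + 1) * k := by
        have := (PySem.Int.floordiv_lt_iff_lt_mul hkpos (a := m + s) (q := L + 1)).mp (by omega)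
        exact this
      -- every x in u is ≤ L, every z in v is ≥ L
      have hpu : u.Pairwise (· ≤ ·) := by
        rw [hsplit] at hpair
        exact (List.pairwise_append.mp hpair).1
      have huL : ∀ x ∈ u, x ≤ L := fun x hx => le_trans (mem_le_getLast hpu hy x hx) hyL
      have hvL : ∀ z ∈ v, L ≤ z := by
        intro z hz
        cases v with
        | nil => simp at hz
        | cons w t =>
          have hw : ¬ k * w - s ≤ m := hR w (by simp)
          have hLw : L < w := by
            rw [hL, PySem.Int.floordiv_lt_iff_lt_mul hkpos]
            nlinarith [hw]
          rcases List.mem_cons.mp hz with rfl | hz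
          · omega
          · have hpv : (w :: t).Pairwise (· ≤ ·) := by
              rw [hsplit] at hpair
              exact (List.pairwise_append.mp hpair).2.1
            have := (List.pairwise_cons.mp hpv).1 z hz
            omega
      -- cost a L = k * L - s
      have hcostL : cost a L = k * L - s := by
        rw [hsplit, cost_append, cost_eq_of_ge u L huL, cost_eq_zero_of_le v L hvL, hk, hs]
        ring
      have hfeasL : cost a L ≤ m := by rw [hcostL]; nlinarith [hLk]
      have hnfeas : ¬ cost a (L + 1) ≤ m := by
        intro hcL
        have h1 : cost u (L + 1) ≤ cost a (L + 1) := by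
          rw [hsplit, cost_append]
          have := cost_nonneg v (L + 1)
          omega
        have h2 := cost_ge_linear u (L + 1)
        rw [← hk, ← hs] at h2
        nlinarith [h1, h2, hcL]
      have hL1 : 1 ≤ L := by
        by_contra hc
        exact hnfeas (le_trans (cost_mono a (by omega : L + 1 ≤ 1)) hm1)
      -- result is min L CAP
      by_cases hcap : (2000000000 : Int) ≤ L
      · rw [min_eq_right hcap]
        right
        refine ⟨by omega, le_refl _, ?_, Or.inl rfl⟩
        rw [← hcost]
        exact le_trans (cost_mono a hcap) hfeasL
      · rw [min_eq_left (by omega)]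
        right
        refine ⟨hL1, by omega, by rw [← hcost]; exact hfeasL, Or.inr ?_⟩
        rw [← hcost]
        exact hnfeas

-- ===== VERDICT (by name: the statement is the Claim_ definition above) =====
theorem parametric_search_spec : Claim_equal_parametric_search := by
  intro arr m _
  unfold Spec_parametric_search
  have hA : IsRes arr m (parametric_search arr m) := by
    unfold parametric_search
    exact psLoop_isRes arr m 2000000000 1 2000000000 (by norm_num) (by norm_num) (by norm_num)
      (by norm_num) (Or.inl rfl) (Or.inl rfl)
  exact isRes_uniq hA (alt_isRes arr m)
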